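-- pv_equiv track=rewrite | github.com/FrederikRothe/Kattis | Hashad/HashadNumbers.py | hashad
-- ===== SOURCE A (Python) =====
-- def hashad(numberString):
--     x = [int(a) for a in str(numberString)]
--     sum = 0
--     for i in range(len(x)):
--         sum += int(x[i])
--     if int(numberString) % sum == 0:
--         return int(numberString)
--     else:
--         return hashad(int(numberString) + 1)
-- ===== SOURCE B (Python) =====
-- def hashad(numberString):
--     candidate = int(numberString)
--     while True:
--         m = candidate
--         s = 0
--         while m > 0:
--             s += m % 10
--             m //= 10
--         if candidate % s == 0:
--             return candidate
--         candidate += 1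
-- ===== Notes on version B (the rewrite author's own statement) =====
-- stated objective: alternative
-- what changed: Replaces A's tail recursion over candidates and its string-parse digit sum (str, per-char int(), indexed range loop over a list) with an explicit while-loop over candidates whose digit sum is computed purely arithmetically by repeated modulus and floor division, with no string or list built.
-- outside the precondition, e.g. on hashad(0): A raises ZeroDivisionError, B raises ZeroDivisionError; on hashad(-1): A raises ValueError, B raises ZeroDivisionError
import Mathlib
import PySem

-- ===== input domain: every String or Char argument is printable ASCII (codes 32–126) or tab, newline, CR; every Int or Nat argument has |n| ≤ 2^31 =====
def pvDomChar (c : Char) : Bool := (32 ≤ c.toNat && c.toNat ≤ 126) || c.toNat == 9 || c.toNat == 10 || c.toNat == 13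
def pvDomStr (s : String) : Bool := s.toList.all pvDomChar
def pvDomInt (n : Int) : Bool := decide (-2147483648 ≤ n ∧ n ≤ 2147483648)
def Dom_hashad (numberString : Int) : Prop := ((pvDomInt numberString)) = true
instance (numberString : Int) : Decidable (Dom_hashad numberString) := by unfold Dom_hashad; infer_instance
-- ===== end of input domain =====

-- B replaces A's recursion-per-candidate with string-parsed digit sums by an explicit
-- candidate loop with a purely arithmetic digit sum (alternative decomposition, return value only).

-- ===== PORT A =====
-- int(a) for a single character a of str(n); the .getD 0 default is reached only when
-- int() raises ValueError (the '-' sign of a negative n), which Pre_hashad excludes.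
def pvParseDigit (c : Char) : Int := (PySem.Int.ofChars? [c]).getD 0

-- the recursion of A, made total with a fuel counter (large enough for every input in Dom);
-- fuel 0 is never reached on inputs satisfying Pre_hashad inside Dom
def pvHashadRecA (fuel : Nat) (n : Int) : Int :=
  match fuel with
  | 0 => 0
  | f + 1 =>
    -- x = [int(a) for a in str(numberString)]
    let x := (PySem.Int.toChars n).map pvParseDigit
    -- for i in range(len(x)): sum += int(x[i])
    let s := (PySem.List.pyRange 0 (x.length : Int) 1).foldl
               (fun acc i => acc + PySem.List.pyGetD x i 0) 0
    if PySem.Int.mod n s == 0 then n else pvHashadRecA f (n + 1)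

def hashad (numberString : Int) : Int := pvHashadRecA (10 ^ 10) numberString

-- ===== PORT B =====
-- while m > 0: s += m % 10; m //= 10   (arithmetic digit sum)
def pvDigitSumB (m : Int) : Int :=
  if h : 0 < m then PySem.Int.mod m 10 + pvDigitSumB (PySem.Int.floordiv m 10) else 0
termination_by m.toNat
decreasing_by
  rw [PySem.Int.floordiv_eq_ediv_of_pos (by norm_num : (0:Int) < 10)]
  omega

-- the 'while True' candidate loop, made total with the same fuel bound
def pvHashadLoopB (fuel : Nat) (candidate : Int) : Int :=
  match fuel with
  | 0 => 0
  | f + 1 =>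
    let s := pvDigitSumB candidate
    if PySem.Int.mod candidate s == 0 then candidate else pvHashadLoopB f (candidate + 1)

def hashad_alt (numberString : Int) : Int := pvHashadLoopB (10 ^ 10) numberString

-- ===== PRECONDITION & SPEC =====
-- Pre_ excludes numberString ≤ 0, on which A raises (ValueError on the '-' sign for
-- negative input, ZeroDivisionError on zero); A returns on every positive input.
def Pre_hashad (numberString : Int) : Prop := 1 ≤ numberString
instance (numberString : Int) : Decidable (Pre_hashad numberString) := by
  unfold Pre_hashad; infer_instance

def pvWitness_hashad : Int := 5

def Spec_hashad (numberString : Int) (out : Int) : Prop := out = hashad_alt numberString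
instance (numberString : Int) (out : Int) : Decidable (Spec_hashad numberString out) := by
  unfold Spec_hashad; infer_instance

-- ===== CLAIM (what is proved, stated in full; the proofs are below) =====
def Claim_equal_hashad : Prop := ∀ (numberString : Int), Dom_hashad numberString →
  Pre_hashad numberString → Spec_hashad numberString (hashad numberString)

-- ===== LEMMAS AND PROOFS =====

-- A's indexed summation loop is the sum of the list
lemma pv_sum_loop (x : List Int) :
    (PySem.List.pyRange 0 (x.length : Int) 1).foldl
      (fun acc i => acc + PySem.List.pyGetD x i 0) 0 = x.sum := by
  rw [PySem.List.foldl_pyRange_pyGetD' (f := fun acc y => acc + y)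
      (xs := x) (d := 0) (init := 0) (a := 0) (by norm_num)]
  simp [List.sum_eq_foldl]

-- parsing the character of a single digit gives the digit back
lemma pv_parse_digitChar (d : Nat) (h : d < 10) :
    pvParseDigit (Nat.digitChar d) = (d : Int) := by
  interval_cases d <;> decide

-- the parsed-digit sum over Nat.toDigitsCore is the base-10 digit sum
lemma pv_sum_toDigitsCore (fuel : Nat) :
    ∀ (m : Nat) (ds : List Char), m < fuel →
      ((Nat.toDigitsCore 10 fuel m ds).map pvParseDigit).sum
        = ((Nat.digits 10 m).sum : Int) + ((ds.map pvParseDigit).sum) := by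
  induction fuel with
  | zero => intro m ds h; omega
  | succ f ih =>
    intro m ds h
    rw [Nat.toDigitsCore]
    by_cases h0 : m / 10 = 0
    · rw [if_pos h0, List.map_cons, List.sum_cons,
        pv_parse_digitChar (m % 10) (Nat.mod_lt _ (by norm_num))]
      rcases Nat.eq_zero_or_pos m with hm | hm
      · subst hm; simp
      · rw [Nat.digits_def' (by norm_num : 1 < 10) hm, h0]
        simp [add_comm]
    · rw [if_neg h0, ih (m / 10) _ (by omega)]
      have hm : 0 < m := by by_contra hc; simp [Nat.eq_zero_of_not_pos hc] at h0
      rw [Nat.digits_def' (by norm_num : 1 < 10) hm]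
      rw [List.map_cons, List.sum_cons,
        pv_parse_digitChar (m % 10) (Nat.mod_lt _ (by norm_num))]
      push_cast [List.sum_cons]
      ring

-- the arithmetic digit sum of B equals the base-10 digit sum
lemma pv_digitSumB_eq (m : Nat) : pvDigitSumB (m : Int) = ((Nat.digits 10 m).sum : Int) := by
  induction m using Nat.strong_induction_on with
  | _ m ih =>
    rw [pvDigitSumB]
    by_cases hm : 0 < m
    · rw [dif_pos (by exact_mod_cast hm)]
      rw [PySem.Int.mod_eq_emod_of_pos (by norm_num : (0:Int) < 10),
        PySem.Int.floordiv_eq_ediv_of_pos (by norm_num : (0:Int) < 10)]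
      have h10 : ((m : Int)) / 10 = ((m / 10 : Nat) : Int) := by omega
      have hmod : ((m : Int)) % 10 = ((m % 10 : Nat) : Int) := by omega
      rw [h10, hmod, ih (m / 10) (Nat.div_lt_self hm (by norm_num))]
      rw [Nat.digits_def' (by norm_num : 1 < 10) hm]
      push_cast [List.sum_cons]
      ring
    · have hz : m = 0 := by omega
      subst hz; simp

-- for positive n, A's string-parsed digit sum equals B's arithmetic digit sum
lemma pv_sum_toChars (n : Int) (h : 1 ≤ n) :
    ((PySem.Int.toChars n).map pvParseDigit).sum = pvDigitSumB n := by
  have hn : ¬ n < 0 := by omega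
  rw [PySem.Int.toChars, if_neg hn, Nat.toDigits,
    pv_sum_toDigitsCore (n.toNat + 1) n.toNat [] (Nat.lt_succ_self _)]
  have hb := pv_digitSumB_eq n.toNat
  rw [(by omega : ((n.toNat : Nat) : Int) = n)] at hb
  rw [hb]
  simp

-- the two fueled loops agree on every positive start
lemma pv_loops_eq (fuel : Nat) : ∀ (n : Int), 1 ≤ n →
    pvHashadRecA fuel n = pvHashadLoopB fuel n := by
  induction fuel with
  | zero => intro n _; rfl
  | succ f ih =>
    intro n hn
    simp only [pvHashadRecA, pvHashadLoopB, pv_sum_loop, pv_sum_toChars n hn]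
    split
    · rfl
    · exact ih (n + 1) (by omega)

-- ===== VERDICT (by name: the statement is the Claim_ definition above) =====
theorem hashad_spec : Claim_equal_hashad := by
  intro n _ hpre
  unfold Spec_hashad hashad hashad_alt
  exact pv_loops_eq _ n hpre
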